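-- pv_equiv track=rewrite | github.com/Aryamanraj/timeSpecificEncryption | tempCodeRunnerFile.py | bounding_box_count
-- ===== SOURCE A (Python) =====
-- from itertools import combinations
--
-- def bounding_box_count(n, x, y):
--     count = 0
--     for i in range(1, n+1):
--         for subset in combinations(range(n), i):
--             min_x = min(x[j] for j in subset)
--             max_x = max(x[j] for j in subset)
--             min_y = min(y[j] for j in subset)
--             max_y = max(y[j] for j in subset)
--             if (max_x - min_x) * (max_y - min_y) > 0:
--                 count += 1
--     return count
-- ===== SOURCE B (Python) =====
-- def bounding_box_count(n, x, y):
--     # inclusion-exclusion: all nonempty subsets, minus those with all x equal,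
--     # minus those with all y equal, plus those with all points identical
--     cx, cy, cxy = {}, {}, {}
--     for p in zip(x[:n], y[:n]):
--         a, b = p
--         cx[a] = cx.get(a, 0) + 1
--         cy[b] = cy.get(b, 0) + 1
--         cxy[p] = cxy.get(p, 0) + 1
--     ex = sum(2**c - 1 for c in cx.values())
--     ey = sum(2**c - 1 for c in cy.values())
--     exy = sum(2**c - 1 for c in cxy.values())
--     return 2**n - 1 - ex - ey + exy
-- ===== Notes on version B (the rewrite author's own statement) =====
-- stated objective: alternative
-- what changed: Replaces A's enumeration of all 2^n-1 nonempty index subsets (computing min/max of each) by a single pass that counts points per x-value, per y-value and per point, then applies inclusion-exclusion: 2^n - 1 minus subsets with all x equal minus subsets with all y equal plus subsets of identical points, each as sum(2^c - 1) over group sizes (O(n) single pass instead of subset enumeration).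
-- outside the precondition, e.g. on bounding_box_count(-1, [], []): A returns 0, B returns -0.5
import Mathlib
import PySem

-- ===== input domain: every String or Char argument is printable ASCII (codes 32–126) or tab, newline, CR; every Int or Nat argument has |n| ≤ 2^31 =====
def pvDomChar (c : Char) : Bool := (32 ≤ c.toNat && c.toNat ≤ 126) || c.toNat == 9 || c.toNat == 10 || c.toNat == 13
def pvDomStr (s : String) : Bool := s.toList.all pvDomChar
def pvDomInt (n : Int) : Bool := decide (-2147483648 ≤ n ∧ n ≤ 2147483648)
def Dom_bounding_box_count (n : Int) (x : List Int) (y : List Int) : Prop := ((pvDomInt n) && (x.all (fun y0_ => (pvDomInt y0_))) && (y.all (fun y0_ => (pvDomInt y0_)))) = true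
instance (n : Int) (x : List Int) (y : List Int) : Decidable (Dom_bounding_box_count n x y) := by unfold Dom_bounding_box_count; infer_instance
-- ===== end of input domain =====

-- B replaces A's scan of all nonempty subsets by inclusion-exclusion over three
-- single-pass group counts (objective: alternative algorithm).

-- ===== PORT A =====

-- itertools.combinations(l, i) (lexicographic order on positions)
def pvCombos {α : Type} : List α → Nat → List (List α)
  | _, 0 => [[]]
  | [], _ + 1 => []
  | a :: t, i + 1 => (pvCombos t i).map (a :: ·) ++ pvCombos t (i + 1)

-- the body of A's inner loop: min/max of the subset's coordinates, then the area test.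
-- Python's min/max raise on an empty sequence and x[j] raises out of range; the
-- 'none' branches (false) are unreachable under Pre_.
def pvBoxCond (x y : List Int) (subset : List Nat) : Bool :=
  match PySem.List.min? (subset.filterMap (fun (j : Nat) => PySem.List.pyGet? x (j : Int))) (fun v => v),
        PySem.List.max? (subset.filterMap (fun (j : Nat) => PySem.List.pyGet? x (j : Int))) (fun v => v),
        PySem.List.min? (subset.filterMap (fun (j : Nat) => PySem.List.pyGet? y (j : Int))) (fun v => v),
        PySem.List.max? (subset.filterMap (fun (j : Nat) => PySem.List.pyGet? y (j : Int))) (fun v => v) with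
  | some mnx, some mxx, some mny, some mxy => decide ((mxx - mnx) * (mxy - mny) > 0)
  | _, _, _, _ => false

def bounding_box_count (n : Int) (x : List Int) (y : List Int) : Int :=
  (PySem.List.pyRange 1 (n + 1) 1).foldl (fun count i =>
    (pvCombos (List.range n.toNat) i.toNat).foldl
      (fun c subset => if pvBoxCond x y subset then c + 1 else c) count) 0

-- ===== PORT B =====

-- d[v] = d.get(v, 0) + 1
def pvStep {κ : Type} [BEq κ] (d : PySem.Dict κ Int) (v : κ) : PySem.Dict κ Int :=
  d.insert v (d.getD v 0 + 1)

-- sum(2**c - 1 for c in d.values())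
def pvGroupSum {κ : Type} [BEq κ] (d : PySem.Dict κ Int) : Int :=
  (d.values.map (fun c => (2 : Int) ^ c.toNat - 1)).sum

def bounding_box_count_alt (n : Int) (x : List Int) (y : List Int) : Int :=
  let pts := (PySem.List.slice x none (some n)).zip (PySem.List.slice y none (some n))
  let s := pts.foldl
    (fun (s : PySem.Dict Int Int × PySem.Dict Int Int × PySem.Dict (Int × Int) Int) p =>
      (pvStep s.1 p.1, pvStep s.2.1 p.2, pvStep s.2.2 p))
    (PySem.Dict.empty, PySem.Dict.empty, PySem.Dict.empty)
  (2 : Int) ^ n.toNat - 1 - pvGroupSum s.1 - pvGroupSum s.2.1 + pvGroupSum s.2.2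

-- ===== PRECONDITION & SPEC =====
-- Pre_ excludes n < 0 (a negative count, outside the natural domain; A happens to return 0
-- there while B's 2**n - 1 leaves the integers) and n > len(x) or n > len(y), where A
-- raises IndexError.
def Pre_bounding_box_count (n : Int) (x : List Int) (y : List Int) : Prop :=
  0 ≤ n ∧ n ≤ x.length ∧ n ≤ y.length
instance (n : Int) (x : List Int) (y : List Int) : Decidable (Pre_bounding_box_count n x y) := by
  unfold Pre_bounding_box_count; infer_instance

def pvWitness_bounding_box_count : Int × List Int × List Int := (3, [0, 1, 0], [0, 0, 2])

def Spec_bounding_box_count (n : Int) (x : List Int) (y : List Int) (out : Int) : Prop :=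
  out = bounding_box_count_alt n x y
instance (n : Int) (x : List Int) (y : List Int) (out : Int) :
    Decidable (Spec_bounding_box_count n x y out) := by
  unfold Spec_bounding_box_count; infer_instance

-- ===== CLAIM (what is proved, stated in full; the proofs are below) =====
def Claim_equal_bounding_box_count : Prop :=
  ∀ (n : Int) (x : List Int) (y : List Int), Dom_bounding_box_count n x y →
    Pre_bounding_box_count n x y → Spec_bounding_box_count n x y (bounding_box_count n x y)

-- ===== LEMMAS AND PROOFS =====

-- "all coordinates (under key f) equal" for a subset, phrased on the first element
def pvEqK {κ : Type} [BEq κ] (f : Int × Int → κ) : List (Int × Int) → Bool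
  | [] => true
  | p :: t => t.all (fun q => f q == f p)

-- pvBoxCond restated on a list of points
def pvPos (S : List (Int × Int)) : Bool :=
  match PySem.List.min? (S.map (·.1)) (fun v => v), PySem.List.max? (S.map (·.1)) (fun v => v),
        PySem.List.min? (S.map (·.2)) (fun v => v), PySem.List.max? (S.map (·.2)) (fun v => v) with
  | some mnx, some mxx, some mny, some mxy => decide ((mxx - mnx) * (mxy - mny) > 0)
  | _, _, _, _ => false

-- ---- small generic helpers ----

theorem pv_sum_map_add {α : Type} (l : List α) (f g : α → Nat) :
    (l.map (fun a => f a + g a)).sum = (l.map f).sum + (l.map g).sum := by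
  induction l with
  | nil => simp
  | cons a t ih => simp [ih]; omega

theorem pv_sum_map_ite {α : Type} (l : List α) (p : α → Bool) :
    (l.map (fun a => if p a then 1 else 0)).sum = l.countP p := by
  induction l with
  | nil => simp
  | cons a t ih => by_cases h : p a <;> simp [List.countP_cons, h, ih] <;> omega

theorem pv_sum_cast {α : Type} (l : List α) (f : α → Nat) :
    (((l.map f).sum : Nat) : Int) = (l.map (fun a => (f a : Int))).sum := by
  induction l with
  | nil => simp
  | cons a t ih => simp [ih]

theorem pv_filterMap_eq_map {α β : Type} (l : List α) (f : α → Option β) (g : α → β)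
    (h : ∀ a ∈ l, f a = some (g a)) : l.filterMap f = l.map g := by
  induction l with
  | nil => simp
  | cons a t ih =>
    simp only [List.filterMap_cons, h a (by simp), List.map_cons]
    rw [ih (fun a ha => h a (by simp [ha]))]

theorem pv_foldl_count {α : Type} (p : α → Bool) (l : List α) (c0 : Int) :
    l.foldl (fun c s => if p s then c + 1 else c) c0 = c0 + l.countP p := by
  induction l generalizing c0 with
  | nil => simp
  | cons a t ih =>
    by_cases h : p a <;> simp [h, ih, List.countP_cons] <;> push_cast <;> ring

-- ---- min/max facts ----

theorem pv_foldl_max_ge (l : List Int) (v : Int) : v ≤ l.foldl max v ∧ ∀ w ∈ l, w ≤ l.foldl max v := by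
  induction l generalizing v with
  | nil => simp
  | cons a t ih =>
    simp only [List.foldl_cons]
    refine ⟨le_trans (le_max_left v a) (ih (max v a)).1, ?_⟩
    intro w hw
    rcases List.mem_cons.1 hw with h | h
    · subst h; exact le_trans (le_max_right v w) (ih (max v w)).1
    · exact (ih (max v a)).2 w h

theorem pv_foldl_min_le (l : List Int) (v : Int) : l.foldl min v ≤ v ∧ ∀ w ∈ l, l.foldl min v ≤ w := by
  induction l generalizing v with
  | nil => simp
  | cons a t ih =>
    simp only [List.foldl_cons]
    refine ⟨le_trans (ih (min v a)).1 (min_le_left v a), ?_⟩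
    intro w hw
    rcases List.mem_cons.1 hw with h | h
    · subst h; exact le_trans (ih (min v w)).1 (min_le_right v w)
    · exact (ih (min v a)).2 w h

theorem pv_foldl_max_of_all (l : List Int) (v : Int) (h : ∀ w ∈ l, w = v) : l.foldl max v = v := by
  induction l with
  | nil => rfl
  | cons a t ih =>
    have ha : a = v := h a (by simp)
    simp only [List.foldl_cons, ha, max_self]
    exact ih (fun w hw => h w (by simp [hw]))

theorem pv_foldl_min_of_all (l : List Int) (v : Int) (h : ∀ w ∈ l, w = v) : l.foldl min v = v := by
  induction l with
  | nil => rfl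
  | cons a t ih =>
    have ha : a = v := h a (by simp)
    simp only [List.foldl_cons, ha, min_self]
    exact ih (fun w hw => h w (by simp [hw]))

theorem pv_spread (l : List Int) (v : Int) :
    (0 < l.foldl max v - l.foldl min v) ↔ ¬ (∀ w ∈ l, w = v) := by
  constructor
  · intro hlt hall
    rw [pv_foldl_max_of_all l v hall, pv_foldl_min_of_all l v hall] at hlt
    omega
  · intro hnall
    push_neg at hnall
    obtain ⟨w, hw, hne⟩ := hnall
    have h1 := (pv_foldl_max_ge l v).1
    have h2 := (pv_foldl_max_ge l v).2 w hw
    have h3 := (pv_foldl_min_le l v).1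
    have h4 := (pv_foldl_min_le l v).2 w hw
    omega

-- pvPos S decides "nonempty and not all x equal and not all y equal"
theorem pvPos_eq (S : List (Int × Int)) :
    pvPos S = (!S.isEmpty && !pvEqK Prod.fst S && !pvEqK Prod.snd S) := by
  cases S with
  | nil => rfl
  | cons p t =>
    have hx : (List.map (fun q : Int × Int => q.1) (p :: t))
        = p.1 :: t.map (fun q : Int × Int => q.1) := rfl
    have hy : (List.map (fun q : Int × Int => q.2) (p :: t))
        = p.2 :: t.map (fun q : Int × Int => q.2) := rfl
    rw [pvPos, hx, hy, PySem.List.min?_id_cons, PySem.List.max?_id_cons,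
        PySem.List.min?_id_cons, PySem.List.max?_id_cons]
    have ex : (0 < (t.map (fun q : Int × Int => q.1)).foldl max p.1
          - (t.map (fun q : Int × Int => q.1)).foldl min p.1)
        ↔ ¬ (∀ w ∈ t.map (fun q : Int × Int => q.1), w = p.1) := pv_spread _ _
    have ey : (0 < (t.map (fun q : Int × Int => q.2)).foldl max p.2
          - (t.map (fun q : Int × Int => q.2)).foldl min p.2)
        ↔ ¬ (∀ w ∈ t.map (fun q : Int × Int => q.2), w = p.2) := pv_spread _ _
    have hmx := (pv_foldl_max_ge (t.map (fun q : Int × Int => q.1)) p.1).1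
    have hmn := (pv_foldl_min_le (t.map (fun q : Int × Int => q.1)) p.1).1
    have hmy := (pv_foldl_max_ge (t.map (fun q : Int × Int => q.2)) p.2).1
    have hny := (pv_foldl_min_le (t.map (fun q : Int × Int => q.2)) p.2).1
    have hprod : (0 < ((t.map (fun q : Int × Int => q.1)).foldl max p.1
          - (t.map (fun q : Int × Int => q.1)).foldl min p.1)
        * ((t.map (fun q : Int × Int => q.2)).foldl max p.2
          - (t.map (fun q : Int × Int => q.2)).foldl min p.2))
        ↔ ((0 < (t.map (fun q : Int × Int => q.1)).foldl max p.1
              - (t.map (fun q : Int × Int => q.1)).foldl min p.1)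
           ∧ (0 < (t.map (fun q : Int × Int => q.2)).foldl max p.2
              - (t.map (fun q : Int × Int => q.2)).foldl min p.2)) := by
      constructor
      · intro h
        constructor <;> by_contra hc <;> push_neg at hc <;> nlinarith
      · intro h; exact mul_pos h.1 h.2
    have hfst : pvEqK Prod.fst (p :: t) = true
        ↔ ∀ w ∈ t.map (fun q : Int × Int => q.1), w = p.1 := by
      simp [pvEqK, List.all_eq_true, List.forall_mem_map]
      try tauto
    have hsnd : pvEqK Prod.snd (p :: t) = true
        ↔ ∀ w ∈ t.map (fun q : Int × Int => q.2), w = p.2 := by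
      simp [pvEqK, List.all_eq_true, List.forall_mem_map]
      try tauto
    rw [Bool.eq_iff_iff]
    simp only [decide_eq_true_eq, List.isEmpty_cons, Bool.not_false, Bool.true_and,
      Bool.and_eq_true, Bool.not_eq_true']
    constructor
    · intro hpos
      obtain ⟨h1, h2⟩ := hprod.mp hpos
      refine ⟨?_, ?_⟩
      · cases hq : pvEqK Prod.fst (p :: t)
        · rfl
        · exact absurd (hfst.mp hq) (ex.mp h1)
      · cases hq : pvEqK Prod.snd (p :: t)
        · rfl
        · exact absurd (hsnd.mp hq) (ey.mp h2)
    · rintro ⟨h1, h2⟩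
      apply hprod.mpr
      refine ⟨ex.mpr ?_, ey.mpr ?_⟩
      · intro hall; rw [hfst.mpr hall] at h1; cases h1
      · intro hall; rw [hsnd.mpr hall] at h2; cases h2

theorem pv_combos_zero {α : Type} (l : List α) : pvCombos l 0 = [[]] := by
  cases l <;> rfl

-- ---- counting over sublists ----

theorem pv_countP_sublists_cons {α : Type} (p : List α → Bool) (a : α) (l : List α) :
    (a :: l).sublists.countP p = l.sublists.countP p + l.sublists.countP (fun s => p (a :: s)) := by
  rw [List.sublists_cons]
  show (l.sublists.flatMap fun x => [x, a :: x]).countP p = _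
  induction l.sublists with
  | nil => simp
  | cons S L ih =>
    simp only [List.flatMap_cons, List.countP_append, List.countP_cons, ih]
    simp [List.countP_cons]
    omega

theorem pv_countP_empty_sublists {α : Type} (l : List α) :
    l.sublists.countP (fun S => S.isEmpty) = 1 := by
  induction l with
  | nil => rfl
  | cons a t ih => rw [pv_countP_sublists_cons]; simp [ih]

theorem pv_countP_ne_sublists {α : Type} (l : List α) :
    l.sublists.countP (fun S => !S.isEmpty) + 1 = 2 ^ l.length := by
  induction l with
  | nil => simp
  | cons a t ih =>
    rw [pv_countP_sublists_cons]
    have h1 : t.sublists.countP (fun s => !(a :: s).isEmpty) = t.sublists.length := by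
      simp
    rw [h1, List.length_sublists]
    simp only [List.length_cons, pow_succ]
    omega

-- split a countP by an extra boolean
theorem pv_countP_split {α : Type} (p q : α → Bool) (l : List α) :
    l.countP p = l.countP (fun a => q a && p a) + l.countP (fun a => !q a && p a) := by
  induction l with
  | nil => simp
  | cons a t ih =>
    by_cases h : q a <;> by_cases h2 : p a <;> simp [List.countP_cons, h, h2, ih] <;> omega

theorem pv_countP_all_sublists {κ : Type} [BEq κ] [LawfulBEq κ] (f : Int × Int → κ) (v : κ)
    (ps : List (Int × Int)) :
    ps.sublists.countP (fun S => S.all (fun p => f p == v)) = 2 ^ ((ps.map f).count v) := by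
  induction ps with
  | nil => simp
  | cons a t ih =>
    rw [pv_countP_sublists_cons]
    have hcons : ∀ s : List (Int × Int),
        ((a :: s).all (fun p => f p == v)) = ((f a == v) && s.all (fun p => f p == v)) := by
      intro s; simp [List.all_cons]
    simp only [hcons]
    by_cases h : f a = v
    · have h1 : t.sublists.countP (fun s => (f a == v) && s.all (fun p => f p == v))
          = t.sublists.countP (fun s => s.all (fun p => f p == v)) := by
        apply List.countP_congr; intro s _; simp [h]
      rw [h1, ih, List.map_cons, List.count_cons]
      simp [h, pow_succ]
      omega
    · have h1 : t.sublists.countP (fun s => (f a == v) && s.all (fun p => f p == v)) = 0 := by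
        apply List.countP_eq_zero.2; intro s _; simp [h]
      rw [h1, ih, List.map_cons, List.count_cons]
      simp [h]

-- nonempty subsets with all keys equal to a fixed v
theorem pv_countP_ne_all_sublists {κ : Type} [BEq κ] [LawfulBEq κ] (f : Int × Int → κ) (v : κ)
    (ps : List (Int × Int)) :
    ps.sublists.countP (fun S => !S.isEmpty && S.all (fun p => f p == v)) + 1
      = 2 ^ ((ps.map f).count v) := by
  have hsplit := pv_countP_split (fun S => S.all (fun p => f p == v)) (fun S => !S.isEmpty)
    ps.sublists
  have hempty : ps.sublists.countP (fun S => !(!S.isEmpty) && S.all (fun p => f p == v))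
      = ps.sublists.countP (fun S => S.isEmpty) := by
    apply List.countP_congr; intro S _
    cases S <;> simp
  rw [hempty, pv_countP_empty_sublists] at hsplit
  rw [← pv_countP_all_sublists f v ps, hsplit]

-- partition the nonempty all-equal subsets by their common key value
theorem pv_partition {κ : Type} [BEq κ] [LawfulBEq κ] (f : Int × Int → κ) (vs : List κ)
    (hnd : vs.Nodup) (L : List (List (Int × Int))) (hmem : ∀ S ∈ L, ∀ p ∈ S, f p ∈ vs) :
    (vs.map (fun v => L.countP (fun S => !S.isEmpty && S.all (fun p => f p == v)))).sum
      = L.countP (fun S => !S.isEmpty && pvEqK f S) := by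
  induction L with
  | nil => simp
  | cons S L' ih =>
    have hrec := ih (fun S hS => hmem S (by simp [hS]))
    have hS := hmem S (by simp)
    simp only [List.countP_cons]
    rw [pv_sum_map_add vs
      (fun v => L'.countP (fun S => !S.isEmpty && S.all (fun p => f p == v)))
      (fun v => if (!S.isEmpty && S.all (fun p => f p == v)) then 1 else 0), hrec, pv_sum_map_ite]
    congr 1
    -- pointwise: the common value is unique in vs
    cases S with
    | nil => simp
    | cons p t =>
      by_cases h : pvEqK f (p :: t) = true
      · have hall : t.all (fun q => f q == f p) = true := h
        have hpred : ∀ v, ((p :: t).all (fun q => f q == v)) = (f p == v) := by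
          intro v
          by_cases hv : f p = v
          · subst hv
            simp only [List.all_cons, beq_self_eq_true, Bool.true_and]
            exact hall
          · simp only [List.all_cons]
            have : (f p == v) = false := by simp [hv]
            simp [this]
        have he1 : vs.countP (fun v => !(p :: t).isEmpty && (p :: t).all (fun q => f q == v))
            = vs.countP (fun v => v == f p) := by
          apply List.countP_congr; intro v _
          simp only [List.isEmpty_cons, Bool.not_false, Bool.true_and, hpred v,
            beq_iff_eq]
          exact ⟨fun hh => hh.symm, fun hh => hh.symm⟩
        have he2 : vs.countP (fun v => v == f p) = vs.count (f p) := rfl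
        rw [he1, he2, List.count_eq_one_of_mem hnd (hS p (by simp))]
        simp [h]
      · have h0 : vs.countP (fun v => !(p :: t).isEmpty && (p :: t).all (fun q => f q == v)) = 0 := by
          apply List.countP_eq_zero.2; intro v _
          simp only [List.isEmpty_cons, Bool.not_false, Bool.true_and, List.all_cons,
            Bool.and_eq_true, beq_iff_eq, not_and]
          intro hp hrest
          apply h
          show t.all (fun q => f q == f p) = true
          rw [List.all_eq_true] at hrest ⊢
          intro q hq
          simp [hrest q hq, hp]
        rw [h0]
        simp [h]

-- inclusion–exclusion, pointwise then counted
theorem pv_eqK_id (S : List (Int × Int)) :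
    pvEqK (fun p => p) S = (pvEqK Prod.fst S && pvEqK Prod.snd S) := by
  cases S with
  | nil => rfl
  | cons p t =>
    show t.all (fun q => q == p) = (t.all (fun q => q.1 == p.1) && t.all (fun q => q.2 == p.2))
    have hq : (fun q : Int × Int => q == p) = (fun q : Int × Int => q.1 == p.1 && q.2 == p.2) := by
      funext q
      rfl
    rw [hq]
    induction t with
    | nil => rfl
    | cons b t2 ih =>
      simp only [List.all_cons, ih]
      cases (b.1 == p.1) <;> cases (b.2 == p.2) <;>
        cases t2.all (fun q => q.1 == p.1) <;> cases t2.all (fun q => q.2 == p.2) <;> rfl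

theorem pv_incl_excl (L : List (List (Int × Int))) :
    L.countP pvPos + L.countP (fun S => !S.isEmpty && pvEqK Prod.fst S)
      + L.countP (fun S => !S.isEmpty && pvEqK Prod.snd S)
    = L.countP (fun S => !S.isEmpty)
      + L.countP (fun S => !S.isEmpty && pvEqK (fun p => p) S) := by
  induction L with
  | nil => simp
  | cons S L' ih =>
    simp only [List.countP_cons]
    have hpt : (if pvPos S then 1 else 0) + (if (!S.isEmpty && pvEqK Prod.fst S) then 1 else 0)
        + (if (!S.isEmpty && pvEqK Prod.snd S) then 1 else 0)
        = (if (!S.isEmpty) then 1 else 0)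
        + (if (!S.isEmpty && pvEqK (fun p => p) S) then 1 else 0) := by
      rw [pvPos_eq, pv_eqK_id]
      cases S.isEmpty <;> cases pvEqK Prod.fst S <;> cases pvEqK Prod.snd S <;> simp
    omega

-- ---- Σ over sizes of combinations = sublists ----

theorem pv_combos_big {α : Type} (l : List α) (i : Nat) (h : l.length < i) : pvCombos l i = [] := by
  induction l generalizing i with
  | nil =>
    cases i with
    | zero => omega
    | succ j => rfl
  | cons a t ih =>
    cases i with
    | zero => omega
    | succ j =>
      have h1 : t.length < j := by simpa using h
      simp [pvCombos, ih j h1, ih (j+1) (by omega)]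

def pvSC {α : Type} (p : List α → Bool) (l : List α) : Nat :=
  ((List.range (l.length + 1)).map (fun i => (pvCombos l i).countP p)).sum

theorem pv_shift_sum {α : Type} (p : List α → Bool) (t : List α) :
    (if p [] then 1 else 0)
      + ((List.range (t.length + 1)).map (fun k => (pvCombos t (k + 1)).countP p)).sum
    = pvSC p t + (pvCombos t (t.length + 1)).countP p := by
  have h1 : (List.range (t.length + 2)).map (fun i => (pvCombos t i).countP p)
      = (pvCombos t 0).countP p ::
        ((List.range (t.length + 1)).map (fun k => (pvCombos t (k + 1)).countP p)) := by
    rw [List.range_succ_eq_map]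
    simp [List.map_map, Function.comp_def, Nat.succ_eq_add_one]
  have h2 : (List.range (t.length + 2)).map (fun i => (pvCombos t i).countP p)
      = ((List.range (t.length + 1)).map (fun i => (pvCombos t i).countP p))
        ++ [(pvCombos t (t.length + 1)).countP p] := by
    rw [show t.length + 2 = (t.length + 1) + 1 from rfl, List.range_succ]
    simp
  have h0 : (pvCombos t 0).countP p = if p [] then 1 else 0 := by
    rw [pv_combos_zero]
    simp [List.countP_cons]
  have h3 := congrArg List.sum h1
  rw [h2] at h3
  simp only [List.sum_cons, List.sum_append, List.sum_nil] at h3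
  unfold pvSC
  omega

theorem pv_SC_cons {α : Type} (p : List α → Bool) (a : α) (t : List α) :
    pvSC p (a :: t) = pvSC (fun s => p (a :: s)) t + pvSC p t := by
  have hsplit : ∀ k, ((pvCombos (a :: t) (k + 1)).countP p)
      = (pvCombos t k).countP (fun s => p (a :: s)) + (pvCombos t (k + 1)).countP p := by
    intro k
    simp [pvCombos, List.countP_append, List.countP_map, Function.comp_def]
  have hrange : pvSC p (a :: t)
      = (pvCombos (a :: t) 0).countP p
        + ((List.range (t.length + 1)).map (fun k => (pvCombos (a :: t) (k + 1)).countP p)).sum := by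
    unfold pvSC
    rw [show (a :: t).length + 1 = (t.length + 1) + 1 from by simp, List.range_succ_eq_map]
    simp [List.map_map, Function.comp_def, Nat.succ_eq_add_one]
  have h0 : (pvCombos (a :: t) 0).countP p = if p [] then 1 else 0 := by
    rw [pv_combos_zero]
    simp [List.countP_cons]
  rw [hrange, h0]
  rw [show (fun k => ((pvCombos (a :: t) (k + 1)).countP p))
      = (fun k => (pvCombos t k).countP (fun s => p (a :: s)) + (pvCombos t (k + 1)).countP p) from
    funext hsplit]
  rw [pv_sum_map_add]
  have hA : ((List.range (t.length + 1)).map (fun k => (pvCombos t k).countP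
      (fun s => p (a :: s)))).sum = pvSC (fun s => p (a :: s)) t := rfl
  have hB := pv_shift_sum p t
  rw [pv_combos_big t (t.length + 1) (by omega)] at hB
  simp only [List.countP_nil] at hB
  omega

theorem pv_SC_eq_sublists {α : Type} (p : List α → Bool) (l : List α) :
    pvSC p l = l.sublists.countP p := by
  induction l generalizing p with
  | nil =>
    unfold pvSC
    simp [pvCombos]
  | cons a t ih =>
    rw [pv_SC_cons, pv_countP_sublists_cons, ih, ih]
    omega

-- ---- A's loop as a countP over sublists of the point list ----

theorem pv_outer_fold (x y : List Int) (idxs : List Nat) (L : List Int) (c0 : Int) :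
    L.foldl (fun count i => (pvCombos idxs i.toNat).foldl
        (fun c subset => if pvBoxCond x y subset then c + 1 else c) count) c0
      = c0 + (L.map (fun i => ((pvCombos idxs i.toNat).countP (pvBoxCond x y) : Int))).sum := by
  induction L generalizing c0 with
  | nil => simp
  | cons i L' ih =>
    simp only [List.foldl_cons, List.map_cons, List.sum_cons]
    rw [ih, pv_foldl_count]
    ring

-- pvBoxCond on an index subset is pvPos on the mapped points
theorem pv_cond_eq_pos (x y : List Int) (m : Nat) (hx : m ≤ x.length) (hy : m ≤ y.length)
    (subset : List Nat) (hsub : ∀ j ∈ subset, j < m) :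
    pvBoxCond x y subset = pvPos (subset.map (fun j => (x.getD j 0, y.getD j 0))) := by
  have hfx : subset.filterMap (fun (j : Nat) => PySem.List.pyGet? x (j : Int))
      = subset.map (fun j => x.getD j 0) := by
    apply pv_filterMap_eq_map
    intro j hj
    have hjx : j < x.length := lt_of_lt_of_le (hsub j hj) hx
    rw [PySem.List.pyGet?_natCast]
    simp [List.getElem?_eq_getElem hjx, List.getD_eq_getElem?_getD,
      List.getElem?_eq_getElem hjx]
  have hfy : subset.filterMap (fun (j : Nat) => PySem.List.pyGet? y (j : Int))
      = subset.map (fun j => y.getD j 0) := by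
    apply pv_filterMap_eq_map
    intro j hj
    have hjy : j < y.length := lt_of_lt_of_le (hsub j hj) hy
    rw [PySem.List.pyGet?_natCast]
    simp [List.getElem?_eq_getElem hjy, List.getD_eq_getElem?_getD,
      List.getElem?_eq_getElem hjy]
  rw [pvBoxCond, hfx, hfy, pvPos]
  simp [List.map_map, Function.comp_def]

-- B's three dicts are counters
theorem pv_triple_fold (l : List (Int × Int)) (a b : PySem.Dict Int Int)
    (c : PySem.Dict (Int × Int) Int) :
    l.foldl (fun s p => (pvStep s.1 p.1, pvStep s.2.1 p.2, pvStep s.2.2 p)) (a, b, c)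
      = (l.foldl (fun d q => pvStep d q.1) a, l.foldl (fun d q => pvStep d q.2) b,
         l.foldl (fun d q => pvStep d q) c) := by
  induction l generalizing a b c with
  | nil => rfl
  | cons p t ih => simp [ih]

theorem pv_group_sum_counter {κ : Type} [BEq κ] [LawfulBEq κ] (xs : List κ) :
    pvGroupSum (PySem.Dict.counter xs)
      = ((PySem.Set.ofList xs).map (fun v => (2 : Int) ^ (xs.count v) - 1)).sum := by
  unfold pvGroupSum
  rw [show (PySem.Dict.counter xs).values = (PySem.Dict.counter xs).items.map (·.2) from rfl,
      PySem.Dict.items_counter]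
  simp [List.map_map, Function.comp_def]

-- the zipped, sliced points equal the index-mapped points
theorem pv_pts_eq (x y : List Int) (m : Nat) (hx : m ≤ x.length) (hy : m ≤ y.length) :
    (x.take m).zip (y.take m) = (List.range m).map (fun j => (x.getD j 0, y.getD j 0)) := by
  apply List.ext_getElem
  · simp
    omega
  · intro i h1 h2
    have him : i < m := by simpa using h2
    have hix : i < x.length := lt_of_lt_of_le him hx
    have hiy : i < y.length := lt_of_lt_of_le him hy
    simp [List.getElem_zip, List.getElem_take, List.getD_eq_getElem?_getD,
      List.getElem?_eq_getElem hix, List.getElem?_eq_getElem hiy]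

-- the central counting identity, stated over the point list
theorem pv_main (ps : List (Int × Int)) :
    (ps.sublists.countP pvPos : Int)
      = 2 ^ ps.length - 1
        - ((PySem.Set.ofList (ps.map (·.1))).map
            (fun v => (2 : Int) ^ ((ps.map (·.1)).count v) - 1)).sum
        - ((PySem.Set.ofList (ps.map (·.2))).map
            (fun v => (2 : Int) ^ ((ps.map (·.2)).count v) - 1)).sum
        + ((PySem.Set.ofList ps).map (fun v => (2 : Int) ^ (ps.count v) - 1)).sum := by
  have hIE := pv_incl_excl ps.sublists
  have hNE := pv_countP_ne_sublists ps
  have hgroup : ∀ (κ : Type) (inst : BEq κ) (instL : LawfulBEq κ) (f : Int × Int → κ)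
      (ks : List κ), ks = ps.map f →
      ((PySem.Set.ofList ks).map (fun v => (2 : Int) ^ (ks.count v) - 1)).sum
        = (ps.sublists.countP (fun S => !S.isEmpty && pvEqK f S) : Int) := by
    intro κ inst instL f ks hks
    have hpart := pv_partition f (PySem.Set.ofList ks) (PySem.Set.nodup_ofList ks) ps.sublists
      (by
        intro S hS p hp
        rw [PySem.Set.mem_ofList, hks]
        have hSs : S.Sublist ps := (List.mem_sublists).1 hS
        exact List.mem_map_of_mem (hSs.subset hp))
    rw [← hpart, pv_sum_cast]
    apply congrArg
    apply List.map_congr_left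
    intro v _
    have hv := pv_countP_ne_all_sublists f v ps
    rw [← hks] at hv
    have hv' : ((ps.sublists.countP (fun S => !S.isEmpty && S.all (fun p => f p == v))) : Int) + 1
        = (2 : Int) ^ (ks.count v) := by
      exact_mod_cast congrArg (fun k : Nat => (k : Int)) hv
    linarith
  have hx := hgroup Int inferInstance inferInstance Prod.fst (ps.map (·.1)) rfl
  have hy := hgroup Int inferInstance inferInstance Prod.snd (ps.map (·.2)) rfl
  have hp := hgroup (Int × Int) inferInstance inferInstance (fun p => p) ps (by simp)
  rw [hx, hy, hp]
  have hIE' : (ps.sublists.countP pvPos : Int)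
      + (ps.sublists.countP (fun S => !S.isEmpty && pvEqK Prod.fst S) : Int)
      + (ps.sublists.countP (fun S => !S.isEmpty && pvEqK Prod.snd S) : Int)
      = (ps.sublists.countP (fun S => !S.isEmpty) : Int)
      + (ps.sublists.countP (fun S => !S.isEmpty && pvEqK (fun p => p) S) : Int) := by
    exact_mod_cast congrArg (fun k : Nat => (k : Int)) hIE
  have hNE' : (ps.sublists.countP (fun S => !S.isEmpty) : Int) + 1 = (2 : Int) ^ ps.length := by
    exact_mod_cast congrArg (fun k : Nat => (k : Int)) hNE
  linarith

-- ===== VERDICT (by name: the statement is the Claim_ definition above) =====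
theorem bounding_box_count_spec : Claim_equal_bounding_box_count := by
  intro n x y _ hpre
  obtain ⟨hn, hnx, hny⟩ := hpre
  unfold Spec_bounding_box_count
  obtain ⟨m, rfl⟩ : ∃ m : Nat, n = (m : Int) := ⟨n.toNat, (Int.toNat_of_nonneg hn).symm⟩
  have hm : (m : Int).toNat = m := Int.toNat_natCast m
  have hmx : m ≤ x.length := by exact_mod_cast hnx
  have hmy : m ≤ y.length := by exact_mod_cast hny
  obtain ⟨ps, hps⟩ : ∃ ps : List (Int × Int),
      ps = (List.range m).map (fun j => (x.getD j 0, y.getD j 0)) := ⟨_, rfl⟩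
  -- ---------- A's side ----------
  have hA : bounding_box_count (m : Int) x y = (ps.sublists.countP pvPos : Int) := by
    unfold bounding_box_count
    rw [pv_outer_fold]
    have hrange : PySem.List.pyRange 1 ((m : Int) + 1) 1
        = (List.range m).map (fun (k : Nat) => 1 + (k : Int)) := by
      rw [PySem.List.pyRange_one, show ((m : Int) + 1 - 1).toNat = m from by omega]
    rw [hrange, List.map_map]
    have hmapped : ((List.range m).map ((fun i => ((pvCombos (List.range (m : Int).toNat)
          i.toNat).countP (pvBoxCond x y) : Int)) ∘ (fun (k : Nat) => 1 + (k : Int))))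
        = (List.range m).map (fun k => ((pvCombos (List.range m) (k + 1)).countP
          (pvBoxCond x y) : Int)) := by
      apply List.map_congr_left
      intro k _
      simp only [Function.comp_apply, hm]
      rw [show (1 + (k : Int)).toNat = k + 1 from by omega]
    rw [hmapped, ← pv_sum_cast]
    have hcond_nil : pvBoxCond x y [] = false := rfl
    have hext : ((List.range (m + 1)).map
          (fun k => (pvCombos (List.range m) (k + 1)).countP (pvBoxCond x y))).sum
        = ((List.range m).map
          (fun k => (pvCombos (List.range m) (k + 1)).countP (pvBoxCond x y))).sum := by
      rw [List.range_succ, List.map_append, List.sum_append]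
      simp [pv_combos_big (List.range m) (m + 1) (by simp)]
    have hshift2 : ((List.range (m + 1)).map
          (fun k => (pvCombos (List.range m) (k + 1)).countP (pvBoxCond x y))).sum
        = pvSC (pvBoxCond x y) (List.range m) := by
      have hshift := pv_shift_sum (pvBoxCond x y) (List.range m)
      simp only [List.length_range, hcond_nil, Bool.false_eq_true, if_false] at hshift
      rw [pv_combos_big (List.range m) (m + 1) (by simp)] at hshift
      simp only [List.countP_nil] at hshift
      omega
    rw [← hext, hshift2, pv_SC_eq_sublists]
    have hcnt : (List.range m).sublists.countP (pvBoxCond x y)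
        = (List.range m).sublists.countP
          (fun s => pvPos (s.map (fun j => (x.getD j 0, y.getD j 0)))) := by
      apply List.countP_congr
      intro s hs
      have hsub : ∀ j ∈ s, j < m := by
        intro j hj
        have hsl : s.Sublist (List.range m) := (List.mem_sublists).1 hs
        exact List.mem_range.1 (hsl.subset hj)
      rw [pv_cond_eq_pos x y m hmx hmy s hsub]
    rw [hcnt]
    have hmapcnt : (List.range m).sublists.countP
          (fun s => pvPos (s.map (fun j => (x.getD j 0, y.getD j 0))))
        = ((List.range m).sublists.map
            (List.map (fun j => (x.getD j 0, y.getD j 0)))).countP pvPos := by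
      rw [List.countP_map]
      rfl
    rw [hmapcnt, ← List.sublists_map, ← hps]
    simp
  -- ---------- B's side ----------
  have hslice_x : PySem.List.slice x none (some (m : Int)) = x.take m :=
    PySem.List.slice_to_natCast x m
  have hslice_y : PySem.List.slice y none (some (m : Int)) = y.take m :=
    PySem.List.slice_to_natCast y m
  have hpts : (PySem.List.slice x none (some (m : Int))).zip
      (PySem.List.slice y none (some (m : Int))) = ps := by
    rw [hslice_x, hslice_y, pv_pts_eq x y m hmx hmy, ← hps]
  have hB : bounding_box_count_alt (m : Int) x y
      = 2 ^ ps.length - 1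
        - pvGroupSum (PySem.Dict.counter (ps.map (·.1)))
        - pvGroupSum (PySem.Dict.counter (ps.map (·.2)))
        + pvGroupSum (PySem.Dict.counter ps) := by
    simp only [bounding_box_count_alt]
    rw [hpts, pv_triple_fold]
    have hc1 : ps.foldl (fun d q => pvStep d q.1) PySem.Dict.empty
        = PySem.Dict.counter (ps.map (·.1)) := by
      rw [← PySem.Dict.foldl_insert_getD_add_one_eq_counter, List.foldl_map]
      rfl
    have hc2 : ps.foldl (fun d q => pvStep d q.2) PySem.Dict.empty
        = PySem.Dict.counter (ps.map (·.2)) := by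
      rw [← PySem.Dict.foldl_insert_getD_add_one_eq_counter, List.foldl_map]
      rfl
    have hc3 : ps.foldl (fun d q => pvStep d q) PySem.Dict.empty = PySem.Dict.counter ps := by
      rw [← PySem.Dict.foldl_insert_getD_add_one_eq_counter]
      rfl
    have hlen : ps.length = m := by rw [hps]; simp
    rw [hc1, hc2, hc3, hlen, hm]
  rw [hA, hB, pv_group_sum_counter, pv_group_sum_counter, pv_group_sum_counter]
  exact pv_main ps
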